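-- pv_equiv track=rewrite | github.com/nieahaya/analiza | 14.12/funkcje.py | analiza_zakresu
-- ===== SOURCE A (Python) =====
-- def analiza_zakresu(lista):
--     def minimum():
--         najmniejsza = lista[0]
--         for liczba in lista:
--             if liczba < najmniejsza:
--                 najmniejsza = liczba
--         return najmniejsza
--
--     def maximum():
--         najwieksza = lista[0]
--         for liczba in lista:
--             if liczba > najwieksza:
--                 najwieksza = liczba
--         return najwieksza
--
--     min_wartosc = minimum()
--     max_wartosc = maximum()
--     roznica = max_wartosc - min_wartosc
--
--     return (min_wartosc, max_wartosc, roznica)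
-- ===== SOURCE B (Python) =====
-- def analiza_zakresu(lista):
--     lo = lista[0]
--     hi = lista[0]
--     for x in lista:
--         if x < lo:
--             lo = x
--         if x > hi:
--             hi = x
--     return (lo, hi, hi - lo)
-- ===== Notes on version B (the rewrite author's own statement) =====
-- stated objective: simpler
-- what changed: Replaces the two separate full-scan helper functions (minimum and maximum) with a single combined pass maintaining both bounds at once.
import Mathlib
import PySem

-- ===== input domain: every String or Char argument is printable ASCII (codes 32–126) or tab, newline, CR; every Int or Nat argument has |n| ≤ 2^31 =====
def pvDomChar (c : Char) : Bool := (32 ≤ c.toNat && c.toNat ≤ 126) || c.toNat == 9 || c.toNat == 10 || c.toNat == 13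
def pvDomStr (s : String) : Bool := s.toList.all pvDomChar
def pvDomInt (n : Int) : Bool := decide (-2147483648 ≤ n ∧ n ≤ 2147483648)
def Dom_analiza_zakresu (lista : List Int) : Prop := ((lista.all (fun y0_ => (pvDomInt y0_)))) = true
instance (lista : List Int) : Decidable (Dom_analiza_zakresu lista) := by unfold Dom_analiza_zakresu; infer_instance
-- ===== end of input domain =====

-- B does a SINGLE combined pass maintaining both bounds, instead of A's two separate helper scans.
-- Both A and B raise IndexError on the empty list (lista[0]); Pre_ excludes it.

-- ===== PORT A =====
-- helper 'minimum': najmniejsza = lista[0]; then scan all of lista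
def pvMinScan (h : Int) (lista : List Int) : Int :=
  lista.foldl (fun najmniejsza liczba => if liczba < najmniejsza then liczba else najmniejsza) h

-- helper 'maximum': najwieksza = lista[0]; then scan all of lista
def pvMaxScan (h : Int) (lista : List Int) : Int :=
  lista.foldl (fun najwieksza liczba => if liczba > najwieksza then liczba else najwieksza) h

def analiza_zakresu (lista : List Int) : Int × Int × Int :=
  match PySem.List.pyGet? lista 0 with
  | none => (0, 0, 0)  -- unreachable under Pre_: lista[0] raises IndexError in Python
  | some h =>
    let min_wartosc := pvMinScan h lista
    let max_wartosc := pvMaxScan h lista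
    (min_wartosc, max_wartosc, max_wartosc - min_wartosc)

-- ===== PORT B =====
def analiza_zakresu_alt (lista : List Int) : Int × Int × Int :=
  match PySem.List.pyGet? lista 0 with
  | none => (0, 0, 0)  -- unreachable under Pre_: lista[0] raises IndexError in Python
  | some h =>
    let p := lista.foldl
      (fun p x =>
        let lo := if x < p.1 then x else p.1
        let hi := if x > p.2 then x else p.2
        (lo, hi)) (h, h)
    (p.1, p.2, p.2 - p.1)

-- ===== PRECONDITION & SPEC =====
def Pre_analiza_zakresu (lista : List Int) : Prop := lista ≠ []
instance (lista : List Int) : Decidable (Pre_analiza_zakresu lista) := by unfold Pre_analiza_zakresu; infer_instance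
def pvWitness_analiza_zakresu : List Int := [3, -1, 7]
def Spec_analiza_zakresu (lista : List Int) (out : Int × Int × Int) : Prop := out = analiza_zakresu_alt lista
instance (lista : List Int) (out : Int × Int × Int) : Decidable (Spec_analiza_zakresu lista out) := by unfold Spec_analiza_zakresu; infer_instance

-- ===== CLAIM (what is proved, stated in full; the proofs are below) =====
def Claim_equal_analiza_zakresu : Prop := ∀ (lista : List Int), Dom_analiza_zakresu lista → Pre_analiza_zakresu lista → Spec_analiza_zakresu lista (analiza_zakresu lista)

-- ===== LEMMAS AND PROOFS =====

-- the combined fold computes the pair of the two separate folds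
theorem pvPairFold (lista : List Int) (a b : Int) :
    lista.foldl
      (fun p x =>
        let lo := if x < p.1 then x else p.1
        let hi := if x > p.2 then x else p.2
        (lo, hi)) (a, b) = (pvMinScan a lista, pvMaxScan b lista) := by
  induction lista generalizing a b with
  | nil => simp [pvMinScan, pvMaxScan]
  | cons y ys ih => simp only [List.foldl]; exact ih _ _

-- ===== VERDICT (by name: the statement is the Claim_ definition above) =====
theorem analiza_zakresu_spec : Claim_equal_analiza_zakresu := by
  intro lista _ _
  unfold Spec_analiza_zakresu analiza_zakresu analiza_zakresu_alt
  cases h : PySem.List.pyGet? lista 0 with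
  | none => rfl
  | some v => simp [pvPairFold]
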